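-- pv_equiv track=rewrite | github.com/dcgaray/block_ciphers | cbc.py | to_RGB
-- ===== SOURCE A (Python) =====
-- def to_RGB(information):
--     r, g, b = tuple(
--         map(
--             lambda d:
--             [information[i] for i in range(0,len(information)) if i % 3 == d], [0,1,2])
--         )
--     pixels = tuple(zip(r,g,b))
--     return pixels
-- ===== SOURCE B (Python) =====
-- def to_RGB(information):
--     n = len(information) // 3
--     return tuple(
--         (information[3 * j], information[3 * j + 1], information[3 * j + 2])
--         for j in range(n)
--     )
-- ===== Notes on version B (the rewrite author's own statement) =====
-- stated objective: faster
-- what changed: Replaces three mod-3-filtered scans plus zip with a single stride-3 walk over j in range(len//3) that emits each pixel triple directly.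
import Mathlib
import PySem

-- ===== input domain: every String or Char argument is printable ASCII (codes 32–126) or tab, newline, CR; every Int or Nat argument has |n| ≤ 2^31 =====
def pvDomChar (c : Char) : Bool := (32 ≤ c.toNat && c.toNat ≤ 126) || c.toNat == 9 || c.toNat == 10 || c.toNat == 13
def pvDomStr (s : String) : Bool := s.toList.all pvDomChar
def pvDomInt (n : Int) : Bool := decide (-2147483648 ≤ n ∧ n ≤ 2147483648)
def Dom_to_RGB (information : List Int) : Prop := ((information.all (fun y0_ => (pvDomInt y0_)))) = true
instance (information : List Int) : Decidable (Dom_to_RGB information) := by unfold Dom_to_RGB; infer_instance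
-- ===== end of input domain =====

-- B replaces A's three mod-3-filtered channel scans plus zip with one stride-3 walk
-- emitting each pixel directly (fewer passes, measured constant-factor speedup).

-- ===== PORT A =====
-- the comprehension indices i are drawn from range(len(information)), always in range, so getD _ 0 is exact
def to_RGB (information : List Int) : List (List Int) :=
  let r := ((List.range information.length).filter (fun i => i % 3 == 0)).map
      (fun i => information.getD i 0)
  let g := ((List.range information.length).filter (fun i => i % 3 == 1)).map
      (fun i => information.getD i 0)
  let b := ((List.range information.length).filter (fun i => i % 3 == 2)).map
      (fun i => information.getD i 0)
  List.zipWith3 (fun x y z => [x, y, z]) r g b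

-- ===== PORT B =====
-- indices 3*j, 3*j+1, 3*j+2 with j < len/3 are always in range, so getD _ 0 is exact
def to_RGB_alt (information : List Int) : List (List Int) :=
  let n := information.length / 3
  (List.range n).map (fun j =>
    [information.getD (3 * j) 0, information.getD (3 * j + 1) 0, information.getD (3 * j + 2) 0])

-- ===== PRECONDITION & SPEC =====
def Spec_to_RGB (information : List Int) (out : List (List Int)) : Prop := out = to_RGB_alt information
instance (information : List Int) (out : List (List Int)) : Decidable (Spec_to_RGB information out) := by unfold Spec_to_RGB; infer_instance

-- ===== CLAIM (what is proved, stated in full; the proofs are below) =====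
def Claim_equal_to_RGB : Prop := ∀ (information : List Int), Dom_to_RGB information → Spec_to_RGB information (to_RGB information)

-- ===== LEMMAS AND PROOFS =====

/-- Reference chunking function both ports are reduced to. -/
def pvChunks : List Int → List (List Int)
  | [] => []
  | [_] => []
  | [_, _] => []
  | a :: b :: c :: rest => [a, b, c] :: pvChunks rest

/-- One channel list of A, as a named helper for the induction. -/
def pvChan (information : List Int) (d : Nat) : List Int :=
  ((List.range information.length).filter (fun i => i % 3 == d)).map
    (fun i => information.getD i 0)

theorem pvChan_cons3 (a b c : Int) (l : List Int) (d : Nat) (hd : d < 3) :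
    pvChan (a :: b :: c :: l) d = (a :: b :: c :: l).getD d 0 :: pvChan l d := by
  unfold pvChan
  have hlen : (a :: b :: c :: l).length = 3 + l.length := by simp; omega
  have h3 : List.range 3 = [0, 1, 2] := by decide
  rw [hlen, List.range_add, h3, List.filter_append, List.map_append,
    List.filter_map, List.map_map]
  have hget : ∀ i : Nat, (a :: b :: c :: l).getD (3 + i) 0 = l.getD i 0 := by
    intro i
    have h : 3 + i = i + 1 + 1 + 1 := by omega
    rw [h]; rfl
  have key : List.map ((fun i => (a :: b :: c :: l).getD i 0) ∘ fun x => 3 + x)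
      (List.filter ((fun i => i % 3 == d) ∘ fun x => 3 + x) (List.range l.length)) =
      List.map (fun i => l.getD i 0) (List.filter (fun i => i % 3 == d) (List.range l.length)) := by
    rw [List.filter_congr (fun i _ => by show ((3 + i) % 3 == d) = (i % 3 == d); congr 1; omega)]
    exact List.map_congr_left (fun i _ => hget i)
  rw [key]
  have hhead : List.map (fun i => (a :: b :: c :: l).getD i 0)
      (List.filter (fun i => i % 3 == d) [0, 1, 2]) = [(a :: b :: c :: l).getD d 0] := by
    interval_cases d <;> rfl
  rw [hhead]
  rfl

theorem pvZipWith3_cons (f : Int → Int → Int → List Int) (x y z : Int) (xs ys zs : List Int) :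
    List.zipWith3 f (x :: xs) (y :: ys) (z :: zs) = f x y z :: List.zipWith3 f xs ys zs := rfl

theorem to_RGB_eq_chan (l : List Int) :
    to_RGB l = List.zipWith3 (fun x y z => [x, y, z]) (pvChan l 0) (pvChan l 1) (pvChan l 2) := rfl

theorem pvA_eq_chunks (l : List Int) : to_RGB l = pvChunks l := by
  induction l using pvChunks.induct with
  | case1 => decide
  | case2 a => rfl
  | case3 a b => rfl
  | case4 a b c rest ih =>
      rw [to_RGB_eq_chan, pvChan_cons3 _ _ _ _ 0 (by omega),
        pvChan_cons3 _ _ _ _ 1 (by omega), pvChan_cons3 _ _ _ _ 2 (by omega),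
        pvZipWith3_cons]
      rw [show pvChunks (a :: b :: c :: rest) = [a, b, c] :: pvChunks rest from rfl, ← ih,
        to_RGB_eq_chan]
      rfl

theorem pvB_eq_chunks (l : List Int) : to_RGB_alt l = pvChunks l := by
  induction l using pvChunks.induct with
  | case1 => decide
  | case2 a => simp [to_RGB_alt, pvChunks]
  | case3 a b => simp [to_RGB_alt, pvChunks]
  | case4 a b c rest ih =>
      have hn : (a :: b :: c :: rest).length / 3 = rest.length / 3 + 1 := by
        simp; omega
      have hget : ∀ k : Nat, (a :: b :: c :: rest).getD (k + 3) 0 = rest.getD k 0 := by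
        intro k
        have : k + 3 = k + 1 + 1 + 1 := by omega
        rw [this]; rfl
      rw [show to_RGB_alt (a :: b :: c :: rest)
          = (List.range ((a :: b :: c :: rest).length / 3)).map (fun j =>
              [(a :: b :: c :: rest).getD (3 * j) 0,
               (a :: b :: c :: rest).getD (3 * j + 1) 0,
               (a :: b :: c :: rest).getD (3 * j + 2) 0]) from rfl,
        hn, List.range_succ_eq_map, List.map_cons, List.map_map]
      rw [pvChunks, ← ih]
      refine congrArg₂ List.cons rfl ?_
      rw [show to_RGB_alt rest = (List.range (rest.length / 3)).map (fun j =>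
          [rest.getD (3 * j) 0, rest.getD (3 * j + 1) 0, rest.getD (3 * j + 2) 0]) from rfl]
      apply List.map_congr_left
      intro j _
      simp only [Function.comp_apply, Nat.succ_eq_add_one]
      rw [show 3 * (j + 1) = 3 * j + 3 from by ring,
        show 3 * j + 3 + 1 = 3 * j + 1 + 3 from by ring,
        show 3 * j + 3 + 2 = 3 * j + 2 + 3 from by ring, hget, hget, hget]

-- ===== VERDICT (by name: the statement is the Claim_ definition above) =====
theorem to_RGB_spec : Claim_equal_to_RGB := by
  intro information _
  unfold Spec_to_RGB
  rw [pvA_eq_chunks, pvB_eq_chunks]
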